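-- pv_equiv track=rewrite | github.com/huntergdavis/jc_reborn | docs/ps1/archaeology/retired-scripts/report-binary-library-gaps.py | compute_gaps
-- ===== SOURCE A (Python) =====
-- def compute_gaps(seqs):
--     gaps = []
--     prev = None
--     for seq in seqs:
--         if prev is not None and seq > prev + 1:
--             gaps.append(
--                 {
--                     "start_sequence": prev + 1,
--                     "end_sequence": seq - 1,
--                     "missing_count": seq - prev - 1,
--                     "previous_success_sequence": prev,
--                     "next_success_sequence": seq,
--                 }
--             )
--         prev = seq
--     return gaps
-- ===== SOURCE B (Python) =====
-- def compute_gaps(seqs):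
--     seqs = list(seqs)
--
--     def junction_gaps(a, b):
--         if b > a + 1:
--             return [{
--                 "start_sequence": a + 1,
--                 "end_sequence": b - 1,
--                 "missing_count": b - a - 1,
--                 "previous_success_sequence": a,
--                 "next_success_sequence": b,
--             }]
--         return []
--
--     def gaps_between(lo, hi):
--         # gaps among adjacent pairs (i - 1, i) with lo < i < hi
--         if hi - lo < 2:
--             return []
--         mid = (lo + hi) // 2
--         return (gaps_between(lo, mid)
--                 + junction_gaps(seqs[mid - 1], seqs[mid])
--                 + gaps_between(mid, hi))
--
--     return gaps_between(0, len(seqs))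
-- ===== Notes on version B (the rewrite author's own statement) =====
-- stated objective: alternative
-- what changed: Replaced the stateful left-to-right scan carrying a prev sentinel with a divide-and-conquer recursion over index ranges: split the range at the midpoint, recurse on both halves and emit only the junction pair's gap, concatenating the results in index order.
import Mathlib
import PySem

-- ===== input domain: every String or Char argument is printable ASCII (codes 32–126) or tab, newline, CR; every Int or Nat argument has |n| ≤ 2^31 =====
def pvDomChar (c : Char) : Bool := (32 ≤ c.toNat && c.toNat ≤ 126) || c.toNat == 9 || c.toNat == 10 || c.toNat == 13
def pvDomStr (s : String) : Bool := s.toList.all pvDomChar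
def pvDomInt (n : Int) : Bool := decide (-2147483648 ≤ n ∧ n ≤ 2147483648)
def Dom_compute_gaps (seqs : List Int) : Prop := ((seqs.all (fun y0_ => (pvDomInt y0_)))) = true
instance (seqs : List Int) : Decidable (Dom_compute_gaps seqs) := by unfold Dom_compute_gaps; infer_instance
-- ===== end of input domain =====

-- B replaces A's stateful scan (None sentinel + prev accumulator) with a divide-and-conquer
-- recursion over index ranges that emits only each junction pair's gap; same results, alternative structure.


-- ===== PORT A =====
-- the gap dict appended inside A's loop
def pvGapDict (prev seq : Int) : List (String × Int) :=
  [("start_sequence", prev + 1), ("end_sequence", seq - 1),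
   ("missing_count", seq - prev - 1), ("previous_success_sequence", prev),
   ("next_success_sequence", seq)]

def compute_gaps (seqs : List Int) : List (List (String × Int)) :=
  (seqs.foldl
    (fun (st : List (List (String × Int)) × Option Int) seq =>
      let gaps :=
        match st.2 with
        | some prev => if seq > prev + 1 then st.1 ++ [pvGapDict prev seq] else st.1
        | none => st.1
      (gaps, some seq))
    ([], none)).1

-- ===== PORT B =====
-- B's junction_gaps helper: the (possibly empty) list of gap dicts for one adjacent pair
def pvJunctionGaps (a b : Int) : List (List (String × Int)) :=
  if b > a + 1 then
    [[("start_sequence", a + 1), ("end_sequence", b - 1),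
      ("missing_count", b - a - 1), ("previous_success_sequence", a),
      ("next_success_sequence", b)]]
  else []

-- B's gaps_between(lo, hi): divide and conquer on the index range.  Python's seqs[mid-1]
-- and seqs[mid] are always in range here (0 ≤ lo < mid < hi ≤ len on every call), so the
-- getD default is never consulted.
def pvGapsBetween (seqs : List Int) (lo hi : Nat) : List (List (String × Int)) :=
  if hi - lo < 2 then []
  else
    let mid := (lo + hi) / 2
    pvGapsBetween seqs lo mid
      ++ pvJunctionGaps (seqs.getD (mid - 1) 0) (seqs.getD mid 0)
      ++ pvGapsBetween seqs mid hi
termination_by hi - lo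
decreasing_by all_goals omega

def compute_gaps_alt (seqs : List Int) : List (List (String × Int)) :=
  pvGapsBetween seqs 0 seqs.length

-- ===== PRECONDITION & SPEC =====
def Spec_compute_gaps (seqs : List Int) (out : List (List (String × Int))) : Prop := out = compute_gaps_alt seqs
instance (seqs : List Int) (out : List (List (String × Int))) : Decidable (Spec_compute_gaps seqs out) := by unfold Spec_compute_gaps; infer_instance

-- ===== CLAIM (what is proved, stated in full; the proofs are below) =====
def Claim_equal_compute_gaps : Prop := ∀ (seqs : List Int), Dom_compute_gaps seqs → Spec_compute_gaps seqs (compute_gaps seqs)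

-- ===== LEMMAS AND PROOFS =====
-- common reference spec: gaps of adjacent pairs, by structural recursion on the list
def pvAdj : List Int → List (List (String × Int))
  | a :: b :: rest => pvJunctionGaps a b ++ pvAdj (b :: rest)
  | _ => []

-- the gap contribution of index i (pair (i-1, i))
def pvGapAt (seqs : List Int) (i : Nat) : List (List (String × Int)) :=
  pvJunctionGaps (seqs.getD (i - 1) 0) (seqs.getD i 0)

-- A's loop invariant once prev is set
theorem compute_gaps_loop (xs : List Int) :
    ∀ (p : Int) (acc : List (List (String × Int))),
      (xs.foldl
        (fun (st : List (List (String × Int)) × Option Int) seq =>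
          let gaps :=
            match st.2 with
            | some prev => if seq > prev + 1 then st.1 ++ [pvGapDict prev seq] else st.1
            | none => st.1
          (gaps, some seq))
        (acc, some p)).1
      = acc ++ pvAdj (p :: xs) := by
  induction xs with
  | nil => intro p acc; simp [pvAdj]
  | cons y ys ih =>
    intro p acc
    rw [List.foldl_cons]
    show (List.foldl _ ((if y > p + 1 then acc ++ [pvGapDict p y] else acc, some y) :
        List (List (String × Int)) × Option Int) ys).1 = _
    by_cases h : y > p + 1
    · rw [if_pos h, ih y (acc ++ [pvGapDict p y])]
      simp [pvAdj, pvJunctionGaps, h, pvGapDict]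
    · rw [if_neg h, ih y acc]
      simp [pvAdj, pvJunctionGaps, h]

-- B's recursion computes the flatMap of pvGapAt over the open index interval
theorem pvGapsBetween_eq (seqs : List Int) (lo hi : Nat) :
    pvGapsBetween seqs lo hi
      = (List.range' (lo + 1) (hi - lo - 1)).flatMap (pvGapAt seqs) := by
  fun_induction pvGapsBetween seqs lo hi with
  | case1 lo hi h =>
    have : hi - lo - 1 = 0 := by omega
    simp [this]
  | case2 lo hi h mid ih1 ih2 =>
    rw [ih1, ih2]
    have hmid1 : lo + 1 ≤ (lo + hi) / 2 := by omega
    have hmid2 : (lo + hi) / 2 + 1 ≤ hi := by omega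
    have h1 : hi - lo - 1 = ((lo + hi) / 2 - lo - 1) + (hi - (lo + hi) / 2) := by omega
    have h2 : (lo + 1) + ((lo + hi) / 2 - lo - 1) = (lo + hi) / 2 := by omega
    have h3 : hi - (lo + hi) / 2 = (hi - (lo + hi) / 2 - 1) + 1 := by omega
    rw [h1, ← List.range'_append_1, h2, h3, List.range'_succ]
    simp only [List.flatMap_cons, List.flatMap_append, List.append_assoc, pvGapAt]
    rfl


-- shifting the index interval by one matches dropping the head of the list
theorem pvGapAt_shift (x : Int) (t : List Int) (n : Nat) :
    ∀ k : Nat, 1 ≤ k →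
      (List.range' (k + 1) n).flatMap (pvGapAt (x :: t))
        = (List.range' k n).flatMap (pvGapAt t) := by
  induction n with
  | zero => intro k _; simp
  | succ m ih =>
    intro k hk
    rw [List.range'_succ, List.range'_succ]
    simp only [List.flatMap_cons]
    have hhd : pvGapAt (x :: t) (k + 1) = pvGapAt t k := by
      obtain ⟨j, rfl⟩ : ∃ j, k = j + 1 := ⟨k - 1, by omega⟩
      simp [pvGapAt]
    rw [hhd, ih (k + 1) (by omega)]

-- the indexed form over the full range is the structural spec
theorem pvRange_adj (seqs : List Int) :
    (List.range' 1 (seqs.length - 1)).flatMap (pvGapAt seqs) = pvAdj seqs := by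
  induction seqs with
  | nil => simp [pvAdj]
  | cons a t ih =>
    cases t with
    | nil => simp [pvAdj]
    | cons b r =>
      have hlen : (a :: b :: r).length - 1 = r.length + 1 := by simp
      rw [hlen, List.range'_succ]
      simp only [List.flatMap_cons]
      have hhd : pvGapAt (a :: b :: r) 1 = pvJunctionGaps a b := by simp [pvGapAt]
      have hshift := pvGapAt_shift a (b :: r) r.length 1 (by omega)
      have : (b :: r).length - 1 = r.length := by simp
      rw [this] at ih
      rw [hhd, hshift, ih]
      simp [pvAdj]

-- ===== VERDICT (by name: the statement is the Claim_ definition above) =====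
theorem compute_gaps_spec : Claim_equal_compute_gaps := by
  intro seqs _
  show compute_gaps seqs = compute_gaps_alt seqs
  have hb : compute_gaps_alt seqs = pvAdj seqs := by
    rw [compute_gaps_alt, pvGapsBetween_eq]
    have : seqs.length - 0 - 1 = seqs.length - 1 := by omega
    rw [this, pvRange_adj]
  rw [hb]
  cases seqs with
  | nil => rfl
  | cons x xs =>
    simp only [compute_gaps, List.foldl_cons]
    exact compute_gaps_loop xs x []
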